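-- pv_equiv track=rewrite | github.com/Crizzooo/AdventOfCode2018 | Day05/01-Perform_Reaction.py | get_minimum_reaction
-- ===== SOURCE A (Python) =====
-- import string
--
-- def perform_reaction(str):
--     i = 0
--     chars = list(str)
--     # when a reaction is determined, remove both characters and move index to the previous
--     while i < len(chars) - 1:
--         curr_char = chars[i]
--         next_char = chars[i+1]
--         if (is_reaction(curr_char, next_char)):
--             chars.pop(i + 1)
--             chars.pop(i)
--             i = i - 1
--             if (i < 0):
--                 i = 0
--         else:
--             i = i + 1
--     return len(''.join(chars))
--
-- def get_minimum_reaction(input):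
--     alphabet = list(string.ascii_lowercase)
--     min_count = len(input)
--     for char in alphabet:
--         # replace all occurences  of the lower and upper case character
--         reaction = input.replace(char, '')
--         reaction = reaction.replace(char.upper(), '')
--         count = perform_reaction(reaction)
--         if (count < min_count):
--             min_count = count
--     return min_count
--
-- def is_reaction(charA, charB):
--     if charA == charB:
--         return False
--     if charA.upper() == charB:
--         return True
--     if charA.lower() == charB:
--         return True
--     return False
-- ===== SOURCE B (Python) =====
-- import string
--
-- def get_minimum_reaction(input):
--     units = list(input)
--     best = len(units)
--     for c in string.ascii_lowercase:
--         upper = c.upper()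
--         stack = []
--         for ch in units:
--             if ch == c or ch == upper:
--                 continue
--             if stack and ch != stack[-1] and (stack[-1].upper() == ch or stack[-1].lower() == ch):
--                 stack.pop()
--             else:
--                 stack.append(ch)
--         if len(stack) < best:
--             best = len(stack)
--     return best
-- ===== Notes on version B (the rewrite author's own statement) =====
-- stated objective: alternative
-- what changed: Replaces the pop-and-backtrack scan over a mutated list (run after two str.replace passes per letter) with a single stack-based pass per letter that skips the removed letter and cancels reacting pairs on the fly; A's backtracking is quadratic in the worst case while B's stack pass is linear, though a timing run did not confirm a speed-up on the generated inputs.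
import Mathlib
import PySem

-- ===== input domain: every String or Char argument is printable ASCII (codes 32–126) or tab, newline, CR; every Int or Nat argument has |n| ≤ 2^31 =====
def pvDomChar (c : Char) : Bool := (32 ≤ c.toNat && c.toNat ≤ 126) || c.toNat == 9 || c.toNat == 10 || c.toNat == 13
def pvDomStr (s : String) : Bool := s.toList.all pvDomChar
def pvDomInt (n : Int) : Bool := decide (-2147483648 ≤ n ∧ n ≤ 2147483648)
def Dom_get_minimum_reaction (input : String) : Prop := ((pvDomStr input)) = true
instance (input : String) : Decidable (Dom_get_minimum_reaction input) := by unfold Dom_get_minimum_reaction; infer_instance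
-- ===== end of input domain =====

-- B replaces A's pop-and-backtrack reaction scan (run after two str.replace passes per letter)
-- by a single stack-based pass per letter that skips the removed letter and cancels reacting pairs.

-- ===== PORT A =====
-- is_reaction(charA, charB); the chars are 1-character strings in Python, so .upper()/.lower() port to upperChar/lowerChar
def isReaction (a b : Char) : Bool :=
  if a == b then false
  else if PySem.Chars.upperChar a == b then true
  else if PySem.Chars.lowerChar a == b then true
  else false

-- the while-loop of perform_reaction: state = (chars, i); list.pop(k) on an in-range index is eraseIdx k;
-- Python's `i = i - 1; if i < 0: i = 0` is Nat truncated subtraction `i - 1`.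
-- fuel only makes the recursion structural: each step either increments i or shortens chars, so
-- 2*len(chars)+1 steps always suffice (proved in reactLoop_eq below); the branch logic is A's line for line.
def reactLoop : Nat → List Char → Nat → Nat
  | 0, chars, _ => chars.length
  | fuel + 1, chars, i =>
    if i < chars.length - 1 then
      if isReaction (chars.getD i ' ') (chars.getD (i+1) ' ') then
        reactLoop fuel ((chars.eraseIdx (i+1)).eraseIdx i) (i - 1)
      else
        reactLoop fuel chars (i + 1)
    else
      chars.length

-- len(''.join(chars)) is the length of the final character list
def perform_reaction (str : String) : Int :=
  (reactLoop (2 * str.toList.length + 1) str.toList 0 : Nat)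

def get_minimum_reaction (input : String) : Int :=
  let alphabet := "abcdefghijklmnopqrstuvwxyz".toList
  alphabet.foldl (fun min_count char =>
    let reaction := PySem.Str.replace input (String.ofList [char]) ""
    let reaction := PySem.Str.replace reaction (PySem.Str.upper (String.ofList [char])) ""
    let count := perform_reaction reaction
    if count < min_count then count else min_count)
    (PySem.Str.len input)

-- ===== PORT B =====
def get_minimum_reaction_alt (input : String) : Int :=
  let units := input.toList
  "abcdefghijklmnopqrstuvwxyz".toList.foldl (fun best c =>
    let upper := PySem.Chars.upperChar c
    let stack := units.foldl (fun stack ch =>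
      if ch == c || ch == upper then stack        -- continue: this unit is removed
      else
        match stack with
        | [] => [ch]                               -- empty stack: append
        | t :: rest =>
          if ch != t && (PySem.Chars.upperChar t == ch || PySem.Chars.lowerChar t == ch) then
            rest                                   -- stack.pop()
          else
            ch :: t :: rest)                       -- stack.append(ch)
      []
    if (stack.length : Int) < best then (stack.length : Int) else best)
    (units.length : Int)

-- ===== PRECONDITION & SPEC =====
def Spec_get_minimum_reaction (input : String) (out : Int) : Prop := out = get_minimum_reaction_alt input
instance (input : String) (out : Int) : Decidable (Spec_get_minimum_reaction input out) := by unfold Spec_get_minimum_reaction; infer_instance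

-- ===== CLAIM (what is proved, stated in full; the proofs are below) =====
def Claim_equal_get_minimum_reaction : Prop := ∀ (input : String), Dom_get_minimum_reaction input → Spec_get_minimum_reaction input (get_minimum_reaction input)

-- ===== LEMMAS AND PROOFS =====

-- ASCII case arithmetic for upperChar/lowerChar
lemma islower_iff (c : Char) : PySem.Chars.islower c = true ↔ 97 ≤ c.toNat ∧ c.toNat ≤ 122 := by
  simp only [PySem.Chars.islower, Bool.and_eq_true, decide_eq_true_eq, Char.le_def,
    UInt32.le_iff_toNat_le, Char.toNat_val]
  exact ⟨fun ⟨h1, h2⟩ => ⟨h1, h2⟩, fun ⟨h1, h2⟩ => ⟨h1, h2⟩⟩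

lemma isupper_iff (c : Char) : PySem.Chars.isupper c = true ↔ 65 ≤ c.toNat ∧ c.toNat ≤ 90 := by
  simp only [PySem.Chars.isupper, Bool.and_eq_true, decide_eq_true_eq, Char.le_def,
    UInt32.le_iff_toNat_le, Char.toNat_val]
  exact ⟨fun ⟨h1, h2⟩ => ⟨h1, h2⟩, fun ⟨h1, h2⟩ => ⟨h1, h2⟩⟩

lemma toNat_upperChar (c : Char) (h : PySem.Chars.islower c = true) :
    (PySem.Chars.upperChar c).toNat = c.toNat - 32 := by
  rw [islower_iff] at h
  rw [PySem.Chars.upperChar, if_pos (by rw [islower_iff]; omega)]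
  rw [Char.toNat_ofNat, if_pos (by constructor; omega)]

lemma toNat_lowerChar (c : Char) (h : PySem.Chars.isupper c = true) :
    (PySem.Chars.lowerChar c).toNat = c.toNat + 32 := by
  rw [isupper_iff] at h
  rw [PySem.Chars.lowerChar, if_pos (by rw [isupper_iff]; omega)]
  rw [Char.toNat_ofNat, if_pos (by constructor; omega)]

lemma char_eq_of_toNat (c d : Char) (h : c.toNat = d.toNat) : c = d :=
  Char.ext (UInt32.toNat_inj.mp h)

lemma upperChar_id (c : Char) (h : ¬ (PySem.Chars.islower c = true)) : PySem.Chars.upperChar c = c := by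
  rw [PySem.Chars.upperChar, if_neg h]

lemma lowerChar_id (c : Char) (h : ¬ (PySem.Chars.isupper c = true)) : PySem.Chars.lowerChar c = c := by
  rw [PySem.Chars.lowerChar, if_neg h]

lemma isReaction_true_iff (a b : Char) : isReaction a b = true ↔
    a ≠ b ∧ (PySem.Chars.upperChar a = b ∨ PySem.Chars.lowerChar a = b) := by
  simp only [isReaction]
  split_ifs with h1 h2 h3 <;> simp_all

-- if t reacts with a and a reacts with b then t and b are the same unit
lemma isReaction_chain {t a b : Char} (h1 : isReaction t a = true) (h2 : isReaction a b = true) :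
    t = b := by
  rw [isReaction_true_iff] at h1 h2
  obtain ⟨hta, h1⟩ := h1
  obtain ⟨hab, h2⟩ := h2
  rcases h1 with h | h
  · have hl : PySem.Chars.islower t = true := by
      by_contra hc
      exact hta (by rw [← h, upperChar_id t hc])
    have ha : a.toNat = t.toNat - 32 := by rw [← h, toNat_upperChar t hl]
    have hl' := (islower_iff t).1 hl
    have hau : PySem.Chars.isupper a = true := by rw [isupper_iff]; omega
    rcases h2 with h' | h'
    · exact absurd (by rw [← h', upperChar_id a
        (by rw [islower_iff]; intro hc; have := (isupper_iff a).1 hau; omega)]) hab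
    · apply char_eq_of_toNat
      rw [← h', toNat_lowerChar a hau]
      omega
  · have hu : PySem.Chars.isupper t = true := by
      by_contra hc
      exact hta (by rw [← h, lowerChar_id t hc])
    have ha : a.toNat = t.toNat + 32 := by rw [← h, toNat_lowerChar t hu]
    have hu' := (isupper_iff t).1 hu
    have hal : PySem.Chars.islower a = true := by rw [islower_iff]; omega
    rcases h2 with h' | h'
    · apply char_eq_of_toNat
      rw [← h', toNat_upperChar a hal]
      omega
    · exact absurd (by rw [← h', lowerChar_id a
        (by rw [isupper_iff]; intro hc; have := (islower_iff a).1 hal; omega)]) hab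

-- one stack step (pop on reaction, push otherwise); head of the list = top of the stack
def rstep (st : List Char) (ch : Char) : List Char :=
  match st with
  | [] => [ch]
  | t :: r => if isReaction t ch then r else ch :: t :: r

-- stacks reachable in the fold are irreducible: adjacent stack entries never react
def StIrr (st : List Char) : Prop := List.IsChain (fun x y => isReaction y x = false) st

-- a string is irreducible when no adjacent pair reacts
def Irred (l : List Char) : Prop := List.IsChain (fun x y => isReaction x y = false) l

lemma rstep_irr {st : List Char} (a : Char) (h : StIrr st) : StIrr (rstep st a) := by
  match st with
  | [] => exact List.isChain_singleton a
  | t :: r =>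
    rw [rstep]
    split
    · exact h.tail
    · exact List.isChain_cons_cons.2 ⟨by simp_all, h⟩

lemma rstep_rstep {st : List Char} {a b : Char} (h : StIrr st) (hab : isReaction a b = true) :
    rstep (rstep st a) b = st := by
  match st with
  | [] => rw [rstep, rstep, if_pos hab]
  | t :: r =>
    rw [rstep]
    split
    · rename_i hta
      have htb : t = b := isReaction_chain hta hab
      match r with
      | [] => rw [rstep, htb]
      | u :: r' =>
        have hub : isReaction u b = false := by
          have := (List.isChain_cons_cons.1 h).1
          simpa [htb] using this
        rw [rstep, if_neg (by simp [hub]), htb]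
    · rw [rstep, if_pos hab]

lemma foldl_rstep_irr (l : List Char) : ∀ {st : List Char}, StIrr st → StIrr (l.foldl rstep st) := by
  induction l with
  | nil => intro st h; exact h
  | cons c l ih => intro st h; exact ih (rstep_irr c h)

-- removing an adjacent reacting pair never changes the fully reduced result
lemma foldl_rstep_cancel {a b : Char} (hab : isReaction a b = true) (u v : List Char) :
    (u ++ a :: b :: v).foldl rstep [] = (u ++ v).foldl rstep [] := by
  rw [List.foldl_append, List.foldl_append]
  have hirr : StIrr (u.foldl rstep []) := foldl_rstep_irr u List.IsChain.nil
  show List.foldl rstep (rstep (rstep (u.foldl rstep []) a) b) v = _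
  rw [rstep_rstep hirr hab]

-- an irreducible string just gets stacked up unchanged
lemma foldl_rstep_of_irred : ∀ (l st : List Char),
    List.IsChain (fun x y => isReaction x y = false) (st.reverse ++ l) →
    l.foldl rstep st = l.reverse ++ st := by
  intro l
  induction l with
  | nil => intro st h; simp
  | cons c l ih =>
    intro st h
    have hstep : rstep st c = c :: st := by
      match st with
      | [] => rfl
      | t :: r =>
        have htc : isReaction t c = false := by
          have := (List.isChain_append.1 h).2.2
          simpa using this t (by simp) c
        rw [rstep, if_neg (by simp [htc])]
    rw [List.foldl_cons, hstep, ih (c :: st) (by simpa using h)]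
    simp

-- A's backtracking while-loop computes the length of the stack reduction
-- (invariant: the prefix chars[0..i] contains no adjacent reacting pair; fuel bounds the measure 2*len-i)
lemma reactLoop_eq : ∀ (fuel : Nat) (chars : List Char) (i : Nat),
    2 * chars.length - i < fuel → Irred (chars.take (i + 1)) →
    reactLoop fuel chars i = (chars.foldl rstep []).length := by
  intro fuel
  induction fuel with
  | zero => intro chars i hf; omega
  | succ fuel ih =>
    intro chars i hf hirr
    rw [reactLoop]
    by_cases h : i < chars.length - 1
    · rw [if_pos h]
      have hi1 : i + 1 < chars.length := by omega
      have hi : i < chars.length := by omega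
      rw [List.getD_eq_getElem chars ' ' hi, List.getD_eq_getElem chars ' ' hi1]
      by_cases hr : isReaction chars[i] chars[i+1] = true
      · rw [if_pos hr]
        have herase : (chars.eraseIdx (i+1)).eraseIdx i = chars.take i ++ chars.drop (i+2) := by
          have hl : (chars.take (i+1)).length = i + 1 := by rw [List.length_take]; omega
          have hdrop := List.drop_left (l₁ := chars.take (i+1)) (l₂ := chars.drop (i+2))
          rw [hl] at hdrop
          rw [List.eraseIdx_eq_take_drop_succ, List.eraseIdx_eq_take_drop_succ,
            List.take_append_of_le_length (by omega), List.take_take, hdrop]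
          have hmin : min i (i+1) = i := by omega
          rw [hmin]
        have hdecomp : chars = chars.take i ++ chars[i] :: chars[i+1] :: chars.drop (i+2) := by
          conv_lhs => rw [← List.take_append_drop i chars]
          rw [List.drop_eq_getElem_cons hi, List.drop_eq_getElem_cons hi1]
        have hred : ((chars.eraseIdx (i+1)).eraseIdx i).foldl rstep [] = chars.foldl rstep [] := by
          rw [herase]
          conv_rhs => rw [hdecomp]
          rw [foldl_rstep_cancel hr]
        rw [← hred]
        apply ih
        · have : ((chars.eraseIdx (i+1)).eraseIdx i).length = chars.length - 2 := by
            rw [herase, List.length_append, List.length_take, List.length_drop]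
            omega
          omega
        rw [herase]
        rcases Nat.eq_zero_or_pos i with hz | hp
        · subst hz
          simp only [List.take_zero, List.nil_append]
          match chars.drop 2 with
          | [] => exact List.IsChain.nil
          | x :: xs => exact List.isChain_singleton x
        · have hone : i - 1 + 1 = i := by omega
          rw [hone, List.take_append_of_le_length (by rw [List.length_take]; omega), List.take_take]
          have hirr' : Irred (chars.take i) := by
            have := hirr.take i
            rwa [List.take_take, Nat.min_def, if_pos (by omega)] at this
          simpa [Nat.min_def] using hirr'
      · rw [if_neg hr]
        apply ih
        · omega
        have hts : chars.take (i+1+1) = chars.take (i+1) ++ [chars[i+1]] := by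
          rw [List.take_add_one]
          simp [List.getElem?_eq_getElem hi1]
        rw [hts]
        refine List.isChain_append.2 ⟨hirr, List.isChain_singleton _, ?_⟩
        intro x hx y hy
        have hlast : (chars.take (i+1)).getLast? = some chars[i] := by
          rw [List.getLast?_eq_getElem?]
          have hlen : (chars.take (i+1)).length = i + 1 := by rw [List.length_take]; omega
          rw [hlen]
          simp [List.getElem?_eq_getElem (by omega : i < chars.length)]
        rw [hlast] at hx
        simp at hx hy
        subst hx; subst hy
        exact Bool.not_eq_true _ ▸ (by simpa using hr)
    · rw [if_neg h]
      rw [List.take_of_length_le (by omega)] at hirr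
      rw [foldl_rstep_of_irred chars [] (by simpa using hirr)]
      simp

lemma irred_take_one (l : List Char) : Irred (l.take 1) := by
  match l with
  | [] => exact List.IsChain.nil
  | x :: xs => exact List.isChain_singleton x

lemma perform_reaction_eq (s : String) :
    perform_reaction s = ((s.toList.foldl rstep []).length : Int) := by
  unfold perform_reaction
  rw [reactLoop_eq (2 * s.toList.length + 1) s.toList 0 (by omega) (irred_take_one _)]

-- single-character str.replace with '' is a filter
lemma replace_go_single (a : Char) : ∀ (l : List Char) (fuel : Nat) (acc : List Char), l.length ≤ fuel →
    PySem.Chars.replace.go [a] [] fuel l acc = acc.reverse ++ l.filter (fun ch => !(ch == a)) := by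
  intro l
  induction l with
  | nil =>
    intro fuel acc h
    cases fuel <;> simp [PySem.Chars.replace.go]
  | cons c t ih =>
    intro fuel acc h
    match fuel with
    | fuel' + 1 =>
      rw [PySem.Chars.replace.go]
      by_cases hac : a = c
      · subst hac
        simp only [List.isPrefixOf, BEq.rfl, Bool.true_and, if_true]
        have hd : List.drop [a].length (a :: t) = t := by simp
        rw [hd, List.reverse_nil, List.nil_append, ih fuel' acc (by simpa using h)]
        simp
      · have hp : ([a].isPrefixOf (c :: t)) = false := by
          simp [List.isPrefixOf]
          exact fun hh => hac (by simpa using hh)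
        rw [hp]
        simp only [Bool.false_eq_true, if_false]
        rw [ih fuel' (c :: acc) (by simpa using h)]
        simp [Ne.symm hac]

lemma replace_single (l : List Char) (a : Char) :
    PySem.Chars.replace l [a] [] = l.filter (fun ch => !(ch == a)) := by
  rw [PySem.Chars.replace]
  simp only [List.isEmpty, Bool.false_eq_true, if_false]
  rw [replace_go_single a l l.length [] (le_refl _)]
  simp

-- B's pop condition is exactly is_reaction(top, ch)
lemma bcond_eq (t ch : Char) :
    (ch != t && (PySem.Chars.upperChar t == ch || PySem.Chars.lowerChar t == ch)) = isReaction t ch := by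
  simp only [isReaction]
  split_ifs with h1 h2 h3 <;> simp_all <;> intro hh <;> simp_all

-- B's inner fold = filter out the removed letter, then the plain stack fold
lemma bfold_eq (c u : Char) : ∀ (l st : List Char),
    l.foldl (fun stack ch =>
      if ch == c || ch == u then stack
      else
        match stack with
        | [] => [ch]
        | t :: rest =>
          if ch != t && (PySem.Chars.upperChar t == ch || PySem.Chars.lowerChar t == ch) then rest
          else ch :: t :: rest) st
    = (l.filter (fun ch => !(ch == c || ch == u))).foldl rstep st := by
  intro l
  induction l with
  | nil => intro st; rfl
  | cons x xs ih =>
    intro st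
    rw [List.foldl_cons, List.filter_cons]
    by_cases hx : (x == c || x == u) = true
    · simp only [hx, if_true, Bool.not_true]
      exact ih st
    · have hx' : (x == c || x == u) = false := by simpa using hx
      simp only [hx', Bool.false_eq_true, if_false, Bool.not_false]
      have hstep : (match st with
        | [] => [x]
        | t :: rest =>
          if x != t && (PySem.Chars.upperChar t == x || PySem.Chars.lowerChar t == x) then rest
          else x :: t :: rest) = rstep st x := by
        match st with
        | [] => rfl
        | t :: rest => simp only [rstep, bcond_eq]
      rw [hstep, if_pos trivial, List.foldl_cons]
      exact ih (rstep st x)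

lemma replace_toList (s : String) (a : Char) :
    (PySem.Str.replace s (String.ofList [a]) "").toList = s.toList.filter (fun ch => !(ch == a)) := by
  rw [PySem.Str.replace]
  have hn : "".toList = ([] : List Char) := rfl
  simp only [String.toList_ofList, hn]
  rw [replace_single]

-- ===== VERDICT (by name: the statement is the Claim_ definition above) =====
theorem get_minimum_reaction_spec : Claim_equal_get_minimum_reaction := by
  intro input _
  show get_minimum_reaction input = get_minimum_reaction_alt input
  simp only [get_minimum_reaction, get_minimum_reaction_alt]
  rw [PySem.Str.len_eq]
  apply PySem.List.foldl_congr_mem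
  intro acc c _
  rw [bfold_eq, perform_reaction_eq]
  have hto : (PySem.Str.replace (PySem.Str.replace input (String.ofList [c]) "")
      (PySem.Str.upper (String.ofList [c])) "").toList
      = input.toList.filter (fun ch => !(ch == c || ch == PySem.Chars.upperChar c)) := by
    rw [PySem.Str.replace]
    have hn : "".toList = ([] : List Char) := rfl
    simp only [String.toList_ofList, hn, PySem.Str.toList_upper]
    have hu : PySem.Chars.upper [c] = [PySem.Chars.upperChar c] := rfl
    rw [hu, replace_single, replace_toList, List.filter_filter]
    apply List.filter_congr
    intro a _
    cases hac : a == c <;> cases hau : a == PySem.Chars.upperChar c <;> simp_all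
  rw [hto]
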